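-- pv_equiv track=rewrite | github.com/WolfMan12333/SSwCV | CVE_2016_2776.py | generate_padding
-- ===== SOURCE A (Python) =====
-- def generate_padding(n):
-- 	max_per_bucket = [0x3f, 0x3f, 0x3f, 0x3d, 0x3f, 0x3f, 0x3f, 0x3d]
-- 	buckets = [1] * len(max_per_bucket)
--
-- 	min_size = len(buckets) * 2 + 2 #2 bytes for every bucket plus each null byte
-- 	max_size = sum(max_per_bucket) + len(buckets) + 2
--
-- 	if not(min_size <= n <= max_size):
-- 		raise RuntimeException("unsupported amount of bytes")
--
-- 	curr_idx, n = 0, n - min_size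
--
-- 	while n > 0:
-- 		next_n = max(n - (max_per_bucket[curr_idx] - 1), 0)
-- 		buckets[curr_idx] = 1 + n - next_n
-- 		n, curr_idx = next_n, curr_idx + 1
--
-- 	n_padding = lambda amount: chr(amount) + "A" * amount
-- 	stringify = lambda sizes: "".join(map(n_padding, sizes)) + "\x00"
--
-- 	return stringify(buckets[:4]), stringify(buckets[4:])
-- ===== SOURCE B (Python) =====
-- def generate_padding(n):
-- 	caps = [0x3f, 0x3f, 0x3f, 0x3d, 0x3f, 0x3f, 0x3f, 0x3d]
--
-- 	min_size = len(caps) * 2 + 2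
-- 	max_size = sum(caps) + len(caps) + 2
--
-- 	if not(min_size <= n <= max_size):
-- 		raise RuntimeException("unsupported amount of bytes")
--
-- 	R = n - min_size
--
-- 	# prefix[i] = total slack the first i buckets can absorb
-- 	prefix = [0]
-- 	for c in caps:
-- 		prefix.append(prefix[-1] + c - 1)
--
-- 	# cut point: number of buckets that are completely full
-- 	j = sum(1 for p in prefix[1:] if p <= R)
--
-- 	# assemble: j full buckets, one partial bucket, trailing minimal buckets
-- 	if j < len(caps):
-- 		buckets = caps[:j] + [1 + R - prefix[j]] + [1] * (len(caps) - j - 1)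
-- 	else:
-- 		buckets = caps[:]
--
-- 	half = len(caps) // 2
-- 	out = lambda bs: "".join(chr(b) + "A" * b for b in bs) + "\x00"
-- 	return out(buckets[:half]), out(buckets[half:])
-- ===== Notes on version B (the rewrite author's own statement) =====
-- stated objective: alternative
-- what changed: Replaces A's sequential greedy fill (a while-loop threading a decreasing remainder through the buckets) by computing the cut point j = count of prefix-sum capacities <= R and assembling the bucket list as three slices (j full buckets, one partial bucket, trailing minimal buckets).
import Mathlib
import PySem

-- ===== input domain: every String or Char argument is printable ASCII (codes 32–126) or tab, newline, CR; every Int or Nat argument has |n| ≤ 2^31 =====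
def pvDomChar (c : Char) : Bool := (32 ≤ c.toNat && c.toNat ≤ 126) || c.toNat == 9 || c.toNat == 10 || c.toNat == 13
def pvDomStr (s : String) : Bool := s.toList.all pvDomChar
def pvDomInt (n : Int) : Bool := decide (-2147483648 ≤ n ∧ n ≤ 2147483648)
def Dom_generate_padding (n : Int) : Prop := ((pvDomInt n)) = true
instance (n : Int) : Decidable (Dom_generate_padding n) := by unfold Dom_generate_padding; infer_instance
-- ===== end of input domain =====

-- B replaces A's sequential greedy fill (while-loop threading a decreasing remainder) by a
-- cut-point computation over prefix sums plus three-slice assembly: alternative decomposition.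

-- ===== PORT A =====
def pvMaxPerBucket : List Int := [0x3f, 0x3f, 0x3f, 0x3d, 0x3f, 0x3f, 0x3f, 0x3d]

-- chr(amount) + "A" * amount
def pvNPadding (a : Int) : String := String.mk (Char.ofNat a.toNat :: List.replicate a.toNat 'A')

-- "".join(map(n_padding, sizes)) + "\x00"
def pvStringify (sizes : List Int) : String := String.join (sizes.map pvNPadding) ++ "\x00"

-- the while loop; fuel only makes it total (inside Pre_ the fuel n.toNat+1 never runs out)
def pvLoopA : Int → Nat → List Int → Nat → List Int
  | _, _, buckets, 0 => buckets
  | n, curr_idx, buckets, fuel+1 =>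
    if n > 0 then
      let cap := (PySem.List.pyGet? pvMaxPerBucket (Int.ofNat curr_idx)).getD 0
      let next_n := max (n - (cap - 1)) 0
      pvLoopA next_n (curr_idx + 1) (buckets.set curr_idx (1 + n - next_n)) fuel
    else buckets

def generate_padding (n : Int) : String × String :=
  let buckets := List.replicate 8 (1 : Int)
  let min_size : Int := 8 * 2 + 2
  -- range check: outside [min_size, max_size] Python raises (excluded by Pre_)
  let n' := n - min_size
  let bks := pvLoopA n' 0 buckets (n'.toNat + 1)
  (pvStringify (bks.take 4), pvStringify (bks.drop 4))   -- buckets[:4], buckets[4:]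

-- ===== PORT B =====
-- prefix = [0]; for c in caps: prefix.append(prefix[-1] + c - 1)
def pvPrefix : List Int :=
  pvMaxPerBucket.foldl
    (fun (acc : List Int) c => acc ++ [(PySem.List.pyGet? acc (-1)).getD 0 + c - 1]) [0]

-- j = sum(1 for p in prefix[1:] if p <= R)
def pvCut (R : Int) : Nat := ((pvPrefix.drop 1).filter (fun p => p ≤ R)).length

-- buckets = caps[:j] + [1 + R - prefix[j]] + [1]*(len-j-1)  (or caps[:] when j = len)
def pvAltBuckets (R : Int) : List Int :=
  let j := pvCut R
  if j < 8 then
    pvMaxPerBucket.take j ++ [1 + R - (PySem.List.pyGet? pvPrefix (Int.ofNat j)).getD 0]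
      ++ List.replicate (8 - j - 1) 1
  else pvMaxPerBucket

-- "".join(chr(b) + "A"*b for b in bs) + "\x00"
def pvJoinPad (sizes : List Int) : String :=
  String.join (sizes.map (fun a => String.mk (Char.ofNat a.toNat :: List.replicate a.toNat 'A'))) ++ "\x00"

def generate_padding_alt (n : Int) : String × String :=
  let R := n - 18
  let b := pvAltBuckets R
  (pvJoinPad (b.take 4), pvJoinPad (b.drop 4))

-- ===== PRECONDITION & SPEC =====
-- Pre_ excludes exactly the inputs on which A raises (the out-of-range check fires and
-- 'raise RuntimeException(...)' produces a NameError): n < 18 or n > 510.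
def Pre_generate_padding (n : Int) : Prop := 18 ≤ n ∧ n ≤ 510
instance (n : Int) : Decidable (Pre_generate_padding n) := by unfold Pre_generate_padding; infer_instance
def pvWitness_generate_padding : Int := (25)

def Spec_generate_padding (n : Int) (out : String × String) : Prop := out = generate_padding_alt n
instance (n : Int) (out : String × String) : Decidable (Spec_generate_padding n out) := by unfold Spec_generate_padding; infer_instance

-- ===== CLAIM (what is proved, stated in full; the proofs are below) =====
def Claim_equal_generate_padding : Prop := ∀ (n : Int), Dom_generate_padding n → Pre_generate_padding n → Spec_generate_padding n (generate_padding n)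

-- ===== LEMMAS AND PROOFS =====

-- the two string builders are the same function
theorem pvStringify_eq_pvJoinPad : pvStringify = pvJoinPad := rfl

-- the bucket lists agree for every admissible remainder k = n - 18 ∈ [0, 492]
set_option maxRecDepth 4000 in
theorem pvBuckets_eq : ∀ k : Nat, k < 493 →
    pvLoopA ((k : Nat) : Int) 0 (List.replicate 8 (1 : Int)) (k + 1) = pvAltBuckets ((k : Nat) : Int) := by
  decide

-- ===== VERDICT (by name: the statement is the Claim_ definition above) =====
theorem generate_padding_spec : Claim_equal_generate_padding := by
  intro n _ hpre
  obtain ⟨h1, h2⟩ := hpre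
  unfold Spec_generate_padding generate_padding generate_padding_alt
  have hn : n - 18 = (((n - 18).toNat : Nat) : Int) := by omega
  have hk : (n - 18).toNat < 493 := by omega
  simp only [show (8 * 2 + 2 : Int) = 18 from rfl]
  rw [hn]
  simp only [Int.toNat_natCast]
  rw [pvBuckets_eq _ hk, pvStringify_eq_pvJoinPad]
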